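-- pv_equiv track=rewrite | github.com/Antonio-JtZhou/Robotic_Final_Proj | map/get_astar.py | reconstruct_all_paths
-- ===== SOURCE A (Python) =====
-- def reconstruct_all_paths(parent_map, start_point, end_point):
--     """
--     使用深度优先搜索从parent_map中重构所有最优路径。
--     """
--     # 如果终点没有父节点，说明没有路径
--     if end_point not in parent_map:
--         return []
--
--     # 使用一个栈来进行DFS
--     stack = [(end_point, [end_point])]
--     all_paths = []
--
--     while stack:
--         current_node, path = stack.pop()
--
--         # 如果回溯到了起点，说明找到了一条完整路径
--         if current_node == start_point:
--             all_paths.append(path[::-1]) # 反转路径使其从起点开始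
--             continue
--
--         # 将父节点推入栈中继续回溯
--         if current_node in parent_map:
--             for parent in parent_map[current_node]:
--                 new_path = path + [parent]
--                 stack.append((parent, new_path))
--
--     return all_paths
-- ===== SOURCE B (Python) =====
-- def reconstruct_all_paths(parent_map, start_point, end_point):
--     """Recursive backtracking re-implementation: one DFS helper builds each
--     path forward (start -> end) by prepending, visiting parents in reversed
--     order to emit paths in the same order as the stack-based original."""
--     if end_point not in parent_map:
--         return []
--     all_paths = []
--
--     def dfs(node, suffix):
--         # suffix is the forward path from `node` to end_point
--         if node == start_point:
--             all_paths.append(suffix)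
--             return
--         for parent in reversed(parent_map.get(node, [])):
--             dfs(parent, [parent] + suffix)
--
--     dfs(end_point, [end_point])
--     return all_paths
-- ===== Notes on version B (the rewrite author's own statement) =====
-- stated objective: simpler
-- what changed: Replaced the explicit stack of (node, reversed-path-copy) pairs by a recursive backtracking helper that builds each path forward by prepending (no final reversal), visiting parents in reversed order so the emitted path list is identical; Pre_ excludes exactly the inputs with a parent-edge cycle reachable from end_point without passing through start_point, on which A's stack loop never terminates (and B's recursion never returns either).
import Mathlib
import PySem

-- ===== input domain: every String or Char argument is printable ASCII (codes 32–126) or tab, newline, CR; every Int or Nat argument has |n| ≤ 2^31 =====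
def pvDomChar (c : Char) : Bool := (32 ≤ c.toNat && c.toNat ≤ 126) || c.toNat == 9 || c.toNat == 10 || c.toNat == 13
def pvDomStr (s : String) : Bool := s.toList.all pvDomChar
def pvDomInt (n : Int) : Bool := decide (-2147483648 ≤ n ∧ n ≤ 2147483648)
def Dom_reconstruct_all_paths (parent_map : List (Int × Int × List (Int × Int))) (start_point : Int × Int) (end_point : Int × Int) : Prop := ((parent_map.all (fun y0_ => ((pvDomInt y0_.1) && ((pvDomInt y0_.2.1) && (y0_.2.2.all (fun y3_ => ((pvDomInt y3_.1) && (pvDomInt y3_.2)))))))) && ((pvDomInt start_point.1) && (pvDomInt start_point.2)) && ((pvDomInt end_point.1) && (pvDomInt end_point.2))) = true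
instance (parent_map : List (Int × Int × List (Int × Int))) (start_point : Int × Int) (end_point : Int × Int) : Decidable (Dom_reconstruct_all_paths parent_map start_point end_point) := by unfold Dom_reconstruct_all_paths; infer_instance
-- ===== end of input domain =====

-- B replaces A's explicit stack of reversed path copies by a recursive backtracking
-- helper that builds each path forward by prepending (objective: simpler; same output,
-- including order, since parents are visited in reversed order).

-- ===== PORT A =====
-- dict lookup on the flattened (key1, key2, value) association entries: first match,
-- exact for a Python dict rendered as an association list in insertion order
def lookupPM (m : List (Int × Int × List (Int × Int))) (k : Int × Int) : Option (List (Int × Int)) :=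
  match m with
  | [] => none
  | (a, b, L) :: rest => if (a, b) = k then some L else lookupPM rest k

-- fuel bound for A's while-loop (a totalization guard only: the loop runs until the
-- stack empties; this fuel is proved sufficient on every input Pre_ admits)
def iterF (K : ℕ) : ℕ → ℕ
  | 0 => 1
  | g + 1 => 1 + K * iterF K g

def sumLens (m : List (Int × Int × List (Int × Int))) : ℕ :=
  m.foldr (fun kv a => kv.2.2.length + a) 0

def fuelA (m : List (Int × Int × List (Int × Int))) : ℕ := iterF (sumLens m) (m.length + 2)

-- the while-loop: stack with top at the head (stack.pop() / append at the Python
-- list's end); pushed parents therefore go reversed onto the head; path[::-1] = .reverse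
def loopA (m : List (Int × Int × List (Int × Int))) (start : Int × Int) :
    ℕ → List ((Int × Int) × List (Int × Int)) → List (List (Int × Int)) →
    Option (List (List (Int × Int)))
  | _, [], acc => some acc
  | 0, _ :: _, _ => none
  | f + 1, (cur, path) :: st, acc =>
    if cur = start then
      loopA m start f st (acc ++ [path.reverse])
    else
      match lookupPM m cur with
      | none => loopA m start f st acc
      | some ps => loopA m start f ((ps.map (fun p => (p, path ++ [p]))).reverse ++ st) acc

def reconstruct_all_paths (parent_map : List (Int × Int × List (Int × Int))) (start_point : Int × Int) (end_point : Int × Int) : List (List (Int × Int)) :=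
  match lookupPM parent_map end_point with
  | none => []
  | some _ =>
    (loopA parent_map start_point (fuelA parent_map) [(end_point, [end_point])] []).getD []

-- ===== PORT B =====
-- Source B's recursive dfs(node, suffix) with its inner for-loop over
-- reversed(parent_map.get(node, [])); fuel = recursion-depth guard only
-- the inner for-loop over the reversed parent list is the foldr below (results
-- concatenated in iteration order, failure propagated)
def dfsB (m : List (Int × Int × List (Int × Int))) (start : Int × Int) :
    ℕ → (Int × Int) → List (Int × Int) → Option (List (List (Int × Int)))
  | 0, _, _ => none
  | g + 1, node, suffix =>
    if node = start then some [suffix]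
    else
      (((lookupPM m node).getD []).reverse).foldr
        (fun p acc => (dfsB m start g p (p :: suffix)).bind fun a => acc.bind fun b => some (a ++ b))
        (some [])

def reconstruct_all_paths_alt (parent_map : List (Int × Int × List (Int × Int))) (start_point : Int × Int) (end_point : Int × Int) : List (List (Int × Int)) :=
  match lookupPM parent_map end_point with
  | none => []
  | some _ =>
    (dfsB parent_map start_point (parent_map.length + 2) end_point [end_point]).getD []

-- ===== PRECONDITION & SPEC =====
-- the parent list A actually explores at x: empty at start_point (the loop
-- `continue`s there without expanding), else the dict entry (first match) or []
def pparents (m : List (Int × Int × List (Int × Int))) (s : Int × Int) (x : Int × Int) : List (Int × Int) :=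
  if x = s then [] else ((m.find? (fun kv => (kv.1, kv.2.1) == x)).map (·.2.2)).getD []

-- rankS m s g x = length of the longest explored parent chain from x, truncated at depth g
def rankS (m : List (Int × Int × List (Int × Int))) (s : Int × Int) : ℕ → (Int × Int) → ℕ
  | 0, _ => 0
  | g + 1, x => (pparents m s x).foldr (fun p acc => max (1 + rankS m s g p) acc) 0

-- Pre_ excludes exactly the inputs with a parent-edge cycle reachable from end_point
-- without passing through start_point: there Python A's stack loop never terminates
-- (and B's recursion never returns either); on every terminating input the longest
-- explored chain from end_point has at most parent_map.length edges, so Pre_ holds.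
def Pre_reconstruct_all_paths (parent_map : List (Int × Int × List (Int × Int))) (start_point : Int × Int) (end_point : Int × Int) : Prop :=
  rankS parent_map start_point (parent_map.length + 1) end_point ≤ parent_map.length

instance (parent_map : List (Int × Int × List (Int × Int))) (start_point : Int × Int) (end_point : Int × Int) : Decidable (Pre_reconstruct_all_paths parent_map start_point end_point) := by
  unfold Pre_reconstruct_all_paths; infer_instance

def pvWitness_reconstruct_all_paths : (List (Int × Int × List (Int × Int))) × (Int × Int) × (Int × Int) :=
  ([(1, 1, [(0, 0)]), (2, 2, [(1, 1), (0, 0)])], (0, 0), (2, 2))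

def Spec_reconstruct_all_paths (parent_map : List (Int × Int × List (Int × Int))) (start_point : Int × Int) (end_point : Int × Int) (out : List (List (Int × Int))) : Prop := out = reconstruct_all_paths_alt parent_map start_point end_point
instance (parent_map : List (Int × Int × List (Int × Int))) (start_point : Int × Int) (end_point : Int × Int) (out : List (List (Int × Int))) : Decidable (Spec_reconstruct_all_paths parent_map start_point end_point out) := by unfold Spec_reconstruct_all_paths; infer_instance

-- ===== CLAIM (what is proved, stated in full; the proofs are below) =====
def Claim_equal_reconstruct_all_paths : Prop := ∀ (parent_map : List (Int × Int × List (Int × Int))) (start_point : Int × Int) (end_point : Int × Int), Dom_reconstruct_all_paths parent_map start_point end_point → Pre_reconstruct_all_paths parent_map start_point end_point → Spec_reconstruct_all_paths parent_map start_point end_point (reconstruct_all_paths parent_map start_point end_point)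

-- ===== LEMMAS AND PROOFS =====

theorem pvWitness_ok :
    Dom_reconstruct_all_paths (pvWitness_reconstruct_all_paths.1) (pvWitness_reconstruct_all_paths.2.1) (pvWitness_reconstruct_all_paths.2.2) ∧
    Pre_reconstruct_all_paths (pvWitness_reconstruct_all_paths.1) (pvWitness_reconstruct_all_paths.2.1) (pvWitness_reconstruct_all_paths.2.2) := by
  constructor <;> decide

-- proof-side abbreviations for the inner folds of dfsB and rankS

def dfsList (m : List (Int × Int × List (Int × Int))) (start : Int × Int)
    (g : ℕ) (qs : List (Int × Int)) (suffix : List (Int × Int)) :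
    Option (List (List (Int × Int))) :=
  qs.foldr
    (fun p acc => (dfsB m start g p (p :: suffix)).bind fun a => acc.bind fun b => some (a ++ b))
    (some [])

def rankList (m : List (Int × Int × List (Int × Int))) (s : Int × Int) (g : ℕ) (L : List (Int × Int)) : ℕ :=
  L.foldr (fun p acc => max (1 + rankS m s g p) acc) 0

theorem dfsB_succ (m : List (Int × Int × List (Int × Int))) (start : Int × Int)
    (g : ℕ) (node : Int × Int) (suffix : List (Int × Int)) :
    dfsB m start (g + 1) node suffix =
      if node = start then some [suffix]
      else dfsList m start g (((lookupPM m node).getD []).reverse) suffix := rfl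

theorem dfsList_nil (m : List (Int × Int × List (Int × Int))) (start : Int × Int)
    (g : ℕ) (suffix : List (Int × Int)) : dfsList m start g [] suffix = some [] := rfl

theorem dfsList_cons (m : List (Int × Int × List (Int × Int))) (start : Int × Int)
    (g : ℕ) (p : Int × Int) (ps : List (Int × Int)) (suffix : List (Int × Int)) :
    dfsList m start g (p :: ps) suffix =
      (dfsB m start g p (p :: suffix)).bind fun a =>
        (dfsList m start g ps suffix).bind fun b => some (a ++ b) := rfl

theorem rankS_succ (m : List (Int × Int × List (Int × Int))) (s : Int × Int) (g : ℕ) (x : Int × Int) :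
    rankS m s (g + 1) x = rankList m s g (pparents m s x) := rfl

theorem rankList_cons (m : List (Int × Int × List (Int × Int))) (s : Int × Int) (g : ℕ)
    (p : Int × Int) (ps : List (Int × Int)) :
    rankList m s g (p :: ps) = max (1 + rankS m s g p) (rankList m s g ps) := rfl

theorem find?_eq_lookupPM (m : List (Int × Int × List (Int × Int))) (x : Int × Int) :
    (m.find? (fun kv => (kv.1, kv.2.1) == x)).map (·.2.2) = lookupPM m x := by
  induction m with
  | nil => rfl
  | cons kv rest ih =>
    obtain ⟨a, b, V⟩ := kv
    rw [lookupPM]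
    rw [List.find?_cons]
    by_cases hk : ((a, b) : Int × Int) = x
    · simp [hk]
    · have : ¬ ((((a, b, V).1, (a, b, V).2.1) : Int × Int) == x) = true := by
        simpa using hk
      simp only [this, if_neg hk]
      exact ih

theorem pparents_eq (m : List (Int × Int × List (Int × Int))) (s x : Int × Int) :
    pparents m s x = if x = s then [] else (lookupPM m x).getD [] := by
  rw [pparents, find?_eq_lookupPM]

-- ---- rank lemmas ----

theorem le_rankList {m : List (Int × Int × List (Int × Int))} {s : Int × Int} {g : ℕ}
    {L : List (Int × Int)} {p : Int × Int} (hp : p ∈ L) :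
    1 + rankS m s g p ≤ rankList m s g L := by
  induction L with
  | nil => cases hp
  | cons q qs ih =>
    rw [rankList_cons]
    rcases List.mem_cons.mp hp with h | h
    · subst h; exact le_max_left _ _
    · exact le_trans (ih h) (le_max_right _ _)

theorem rankList_eq_zero {m : List (Int × Int × List (Int × Int))} {s : Int × Int} {g : ℕ}
    {L : List (Int × Int)} (h : rankList m s g L = 0) : L = [] := by
  cases L with
  | nil => rfl
  | cons p ps =>
    rw [rankList_cons] at h
    omega

theorem rankList_congr {m : List (Int × Int × List (Int × Int))} {s : Int × Int} {g1 g2 : ℕ}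
    {L : List (Int × Int)} (h : ∀ p ∈ L, rankS m s g1 p = rankS m s g2 p) :
    rankList m s g1 L = rankList m s g2 L := by
  induction L with
  | nil => rfl
  | cons p ps ih =>
    rw [rankList_cons, rankList_cons, h p (by simp), ih (fun q hq => h q (by simp [hq]))]

-- one-step stabilization: once the truncated rank fits under the fuel, adding fuel changes nothing
theorem rankS_stab (m : List (Int × Int × List (Int × Int))) (s : Int × Int) :
    ∀ (g : ℕ) (x : Int × Int), rankS m s (g + 1) x ≤ g → rankS m s (g + 2) x = rankS m s (g + 1) x := by
  intro g
  induction g with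
  | zero =>
    intro x h
    rw [rankS_succ] at h
    have hL : pparents m s x = [] := rankList_eq_zero (Nat.le_zero.mp h)
    rw [rankS_succ, rankS_succ, hL]
    rfl
  | succ g ih =>
    intro x h
    rw [rankS_succ] at h
    rw [rankS_succ, rankS_succ]
    apply rankList_congr
    intro p hp
    have h1 : 1 + rankS m s (g + 1) p ≤ rankList m s (g + 1) (pparents m s x) := le_rankList hp
    exact ih p (by omega)

-- along an explored edge (x ≠ start, p a parent of x) the stable truncated rank strictly decreases
theorem rank_decrease {m : List (Int × Int × List (Int × Int))} {s : Int × Int} {n : ℕ}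
    {x p : Int × Int} {L : List (Int × Int)}
    (hx : rankS m s (n + 1) x ≤ n) (hxs : x ≠ s) (hL : lookupPM m x = some L) (hp : p ∈ L) :
    rankS m s (n + 1) p < rankS m s (n + 1) x := by
  have hstab := rankS_stab m s n x hx
  have hpp : pparents m s x = L := by
    rw [pparents_eq]
    simp [hxs, hL]
  have h2 : rankS m s (n + 2) x = rankList m s (n + 1) L := by
    rw [rankS_succ, hpp]
  have h3 : 1 + rankS m s (n + 1) p ≤ rankList m s (n + 1) L := le_rankList hp
  omega

-- ---- B-side: the fueled dfs succeeds whenever the fuel exceeds the stable rank ----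

theorem dfs_succeeds {m : List (Int × Int × List (Int × Int))} {s : Int × Int} :
    ∀ k : ℕ,
      (∀ x suffix, rankS m s (m.length + 1) x ≤ m.length → rankS m s (m.length + 1) x < k →
        ∃ o, dfsB m s k x suffix = some o) ∧
      (∀ qs suffix, (∀ p ∈ qs, rankS m s (m.length + 1) p ≤ m.length ∧ rankS m s (m.length + 1) p < k) →
        ∃ o, dfsList m s k qs suffix = some o) := by
  intro k
  induction k with
  | zero =>
    constructor
    · intro x suffix _ h; omega
    · intro qs suffix h
      cases qs with
      | nil => exact ⟨[], rfl⟩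
      | cons p ps => exact absurd (h p (by simp)).2 (by omega)
  | succ k ih =>
    have hB : ∀ x suffix, rankS m s (m.length + 1) x ≤ m.length → rankS m s (m.length + 1) x < k + 1 →
        ∃ o, dfsB m s (k + 1) x suffix = some o := by
      intro x suffix hxn hx
      rw [dfsB_succ]
      by_cases hxs : x = s
      · simp [hxs]
      · simp only [hxs, if_false]
        apply ih.2
        intro p hp
        rw [List.mem_reverse] at hp
        cases hL : lookupPM m x with
        | none => rw [hL] at hp; simp at hp
        | some L =>
          rw [hL] at hp
          simp only [Option.getD_some] at hp
          have := rank_decrease hxn hxs hL hp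
          omega
    refine ⟨hB, ?_⟩
    intro qs
    induction qs with
    | nil => intro suffix _; exact ⟨[], rfl⟩
    | cons p ps ihq =>
      intro suffix h
      obtain ⟨a, ha⟩ := hB p (p :: suffix) (h p (by simp)).1 (h p (by simp)).2
      obtain ⟨b, hb⟩ := ihq suffix (fun q hq => h q (by simp [hq]))
      exact ⟨a ++ b, by rw [dfsList_cons, ha, hb]; rfl⟩

-- ---- A-side: stack-machine lemmas ----

theorem loopA_mono {m : List (Int × Int × List (Int × Int))} {s : Int × Int} :
    ∀ (f f' : ℕ) (st : List ((Int × Int) × List (Int × Int))) (acc r : List (List (Int × Int))),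
      loopA m s f st acc = some r → f ≤ f' → loopA m s f' st acc = some r := by
  intro f
  induction f with
  | zero =>
    intro f' st acc r h _
    cases st with
    | nil => cases h; cases f' <;> rfl
    | cons e st' => simp [loopA] at h
  | succ f ih =>
    intro f' st acc r h hle
    cases st with
    | nil => cases h; cases f' <;> rfl
    | cons e st' =>
      obtain ⟨cur, path⟩ := e
      obtain ⟨f'', rfl⟩ : ∃ f'', f' = f'' + 1 := ⟨f' - 1, by omega⟩
      rw [loopA] at h ⊢
      by_cases hcur : cur = s
      · simp only [hcur, if_true] at h ⊢
        exact ih f'' _ _ _ h (by omega)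
      · simp only [hcur, if_false] at h ⊢
        cases hsplit : lookupPM m cur with
        | none =>
          simp only [hsplit] at h ⊢
          exact ih f'' _ _ _ h (by omega)
        | some ps =>
          simp only [hsplit] at h ⊢
          exact ih f'' _ _ _ h (by omega)

theorem loopA_seq {m : List (Int × Int × List (Int × Int))} {s : Int × Int} :
    ∀ (f1 : ℕ) (s1 : List ((Int × Int) × List (Int × Int))) (acc r : List (List (Int × Int))),
      loopA m s f1 s1 acc = some r →
      ∀ (f2 : ℕ) (s2 : List ((Int × Int) × List (Int × Int))) (r2 : List (List (Int × Int))),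
        loopA m s f2 s2 r = some r2 → loopA m s (f1 + f2) (s1 ++ s2) acc = some r2 := by
  intro f1
  induction f1 with
  | zero =>
    intro s1 acc r h f2 s2 r2 h2
    cases s1 with
    | nil => cases h; simpa using h2
    | cons e st' => simp [loopA] at h
  | succ f ih =>
    intro s1 acc r h f2 s2 r2 h2
    cases s1 with
    | nil =>
      cases h
      exact loopA_mono f2 (f + 1 + f2) _ _ _ h2 (by omega)
    | cons e st' =>
      obtain ⟨cur, path⟩ := e
      have hfs : f + 1 + f2 = (f + f2) + 1 := by omega
      rw [hfs]
      rw [loopA] at h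
      rw [List.cons_append, loopA]
      by_cases hcur : cur = s
      · simp only [hcur, if_true] at h ⊢
        exact ih _ _ _ h f2 s2 r2 h2
      · simp only [hcur, if_false] at h ⊢
        cases hsplit : lookupPM m cur with
        | none =>
          simp only [hsplit] at h ⊢
          exact ih _ _ _ h f2 s2 r2 h2
        | some ps =>
          simp only [hsplit] at h ⊢
          rw [← List.append_assoc]
          exact ih _ _ _ h f2 s2 r2 h2

theorem lookupPM_len_le {m : List (Int × Int × List (Int × Int))} {x : Int × Int} {L : List (Int × Int)}
    (h : lookupPM m x = some L) : L.length ≤ sumLens m := by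
  induction m with
  | nil => simp [lookupPM] at h
  | cons kv rest ih =>
    obtain ⟨a, b, V⟩ := kv
    rw [lookupPM] at h
    rw [sumLens, List.foldr_cons]
    split at h
    · injection h with h'; subst h'; simp
    · have := ih h
      rw [sumLens] at this
      simp only
      omega

-- one dfs call is simulated by the stack loop on the single corresponding entry,
-- within an explicit fuel bound
theorem dfs_to_loop {m : List (Int × Int × List (Int × Int))} {s : Int × Int} :
    ∀ (g : ℕ) (x : Int × Int) (path : List (Int × Int)) (outs : List (List (Int × Int)))
      (acc : List (List (Int × Int))),
      dfsB m s g x path.reverse = some outs →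
      ∃ f, f ≤ iterF (sumLens m) g ∧ loopA m s f [(x, path)] acc = some (acc ++ outs) := by
  intro g
  induction g with
  | zero => intro x path outs acc h; simp [dfsB] at h
  | succ g ih =>
    -- the list version, at fuel g, derived from the induction hypothesis
    have hlist : ∀ (qs : List (Int × Int)) (path : List (Int × Int)) (outs acc : List (List (Int × Int))),
        dfsList m s g qs path.reverse = some outs →
        ∃ f, f ≤ qs.length * iterF (sumLens m) g ∧
          loopA m s f (qs.map (fun p => (p, path ++ [p]))) acc = some (acc ++ outs) := by
      intro qs
      induction qs with
      | nil =>
        intro path outs acc h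
        rw [dfsList_nil] at h
        injection h with h'
        subst h'
        exact ⟨0, by simp, by simp [loopA]⟩
      | cons p ps ihq =>
        intro path outs acc h
        rw [dfsList_cons] at h
        cases ha : dfsB m s g p (p :: path.reverse) with
        | none => rw [ha] at h; simp at h
        | some a =>
          rw [ha] at h
          cases hb : dfsList m s g ps path.reverse with
          | none => rw [hb] at h; simp at h
          | some b =>
            rw [hb] at h
            simp only [Option.bind_some] at h
            injection h with h'
            subst h'
            have ha' : dfsB m s g p (path ++ [p]).reverse = some a := by
              rw [List.reverse_append]; simpa using ha
            obtain ⟨f1, hf1, hl1⟩ := ih p (path ++ [p]) a acc ha'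
            obtain ⟨f2, hf2, hl2⟩ := ihq path b (acc ++ a) hb
            refine ⟨f1 + f2, ?_, ?_⟩
            · have hlen : (p :: ps).length = ps.length + 1 := rfl
              rw [hlen]
              calc f1 + f2 ≤ iterF (sumLens m) g + ps.length * iterF (sumLens m) g := by omega
                _ = (ps.length + 1) * iterF (sumLens m) g := by ring
            · have := loopA_seq f1 [(p, path ++ [p])] acc (acc ++ a) hl1 f2
                (ps.map (fun q => (q, path ++ [q]))) ((acc ++ a) ++ b) hl2
              simpa [List.append_assoc] using this
    intro x path outs acc h
    rw [dfsB_succ] at h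
    by_cases hxs : x = s
    · simp only [hxs, if_true] at h
      injection h with h'
      subst h'
      refine ⟨1, ?_, ?_⟩
      · rw [iterF]; omega
      · subst hxs
        rw [loopA]
        simp [loopA]
    · simp only [hxs, if_false] at h
      cases hL : lookupPM m x with
      | none =>
        rw [hL] at h
        simp only [Option.getD_none, List.reverse_nil] at h
        rw [dfsList_nil] at h
        injection h with h'
        subst h'
        refine ⟨1, by rw [iterF]; omega, ?_⟩
        rw [loopA]
        simp [hxs, hL, loopA]
      | some L =>
        rw [hL] at h
        simp only [Option.getD_some] at h
        obtain ⟨f', hf', hl'⟩ := hlist L.reverse path outs acc h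
        refine ⟨f' + 1, ?_, ?_⟩
        · have hKle : L.length ≤ sumLens m := lookupPM_len_le hL
          rw [iterF]
          have hf'' : f' ≤ L.length * iterF (sumLens m) g := by
            rw [List.length_reverse] at hf'; exact hf'
          have hmul : L.length * iterF (sumLens m) g ≤ sumLens m * iterF (sumLens m) g :=
            Nat.mul_le_mul_right _ hKle
          omega
        · rw [loopA]
          simp only [hxs, if_false, hL]
          have hrw : (L.map (fun p => (p, path ++ [p]))).reverse ++ ([] : List ((Int × Int) × List (Int × Int))) =
              L.reverse.map (fun p => (p, path ++ [p])) := by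
            simp
          rw [hrw]
          exact hl'

-- ===== VERDICT (by name: the statement is the Claim_ definition above) =====
theorem reconstruct_all_paths_spec : Claim_equal_reconstruct_all_paths := by
  intro m s e _ hPre
  unfold Spec_reconstruct_all_paths
  unfold reconstruct_all_paths reconstruct_all_paths_alt
  cases hL : lookupPM m e with
  | none => rfl
  | some L0 =>
    have hrank : rankS m s (m.length + 1) e ≤ m.length := hPre
    obtain ⟨outs, houts⟩ := (dfs_succeeds (m.length + 2)).1 e [e] hrank (by omega)
    have houts' : dfsB m s (m.length + 2) e ([e] : List (Int × Int)).reverse = some outs := by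
      simpa using houts
    obtain ⟨f, hf, hloop⟩ := dfs_to_loop (m.length + 2) e [e] outs [] houts'
    have hloop' : loopA m s (fuelA m) [(e, [e])] [] = some outs :=
      loopA_mono f (fuelA m) _ _ _ hloop hf
    rw [hloop', houts]
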